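-- pv_equiv track=rewrite | github.com/pypi-data/pypi-mirror-374 | packages/siren-rnai/siren_rnai-0.1.6-py3-none-any.whl/siren_rnai/siren_prefilter.py | kmerset
-- ===== SOURCE A (Python) =====
-- from typing import Iterator, Tuple, List, Set
--
-- def kmerset(seq: str, k: int) -> Set[str]:
--     S = set()
--     n = len(seq)
--     if n < k:
--         return S
--     for i in range(n - k + 1):
--         kmer = seq[i:i+k]
--         if "N" in kmer:
--             continue
--         S.add(kmer)
--     return S
-- ===== SOURCE B (Python) =====
-- def kmerset(seq: str, k: int):
--     S = set()
--     for segment in seq.split("N"):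
--         for i in range(len(segment) - k + 1):
--             S.add(segment[i:i+k])
--     return S
-- ===== Notes on version B (the rewrite author's own statement) =====
-- stated objective: alternative
-- what changed: B splits the sequence at 'N' into maximal N-free segments and slides a k-window inside each segment, instead of A's scan of every position with a substring test for 'N' in each window.
-- outside the precondition, e.g. on kmerset('NGCANN', -3): A returns {'', 'GCA'}, B returns {''}
import Mathlib
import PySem

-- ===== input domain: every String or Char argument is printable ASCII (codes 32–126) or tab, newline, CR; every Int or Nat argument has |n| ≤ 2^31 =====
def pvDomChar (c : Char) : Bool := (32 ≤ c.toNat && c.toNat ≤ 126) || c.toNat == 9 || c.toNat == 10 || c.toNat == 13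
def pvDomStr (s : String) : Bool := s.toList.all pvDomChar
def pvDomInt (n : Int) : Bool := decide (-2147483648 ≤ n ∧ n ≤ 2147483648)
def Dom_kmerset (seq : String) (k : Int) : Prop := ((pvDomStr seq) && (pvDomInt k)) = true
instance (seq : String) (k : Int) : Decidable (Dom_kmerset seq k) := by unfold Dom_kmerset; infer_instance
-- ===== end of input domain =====

-- B replaces A's scan-every-position-and-test-for-'N' by splitting the sequence into maximal
-- N-free segments and sliding a window inside each segment (objective: alternative decomposition).

-- ===== PORT A =====
def kmerset (seq : String) (k : Int) : List String :=
  let S : PySem.Set String := PySem.Set.empty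
  let n : Int := PySem.Str.len seq
  if n < k then S
  else
    (PySem.List.pyRange 0 (n - k + 1) 1).foldl
      (fun S i =>
        let kmer := PySem.Str.slice seq (some i) (some (i + k))
        if PySem.Str.isIn "N" kmer then S else PySem.Set.add S kmer) S

-- ===== PORT B =====
-- transliteration of Source B; seq.split("N") is PySem.Str.split? with the non-empty literal "N",
-- so the `.getD []` default is never taken.
def kmerset_alt (seq : String) (k : Int) : List String :=
  ((PySem.Str.split? seq "N").getD []).foldl
    (fun S segment =>
      (PySem.List.pyRange 0 (PySem.Str.len segment - k + 1) 1).foldl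
        (fun S i => PySem.Set.add S (PySem.Str.slice segment (some i) (some (i + k)))) S)
    PySem.Set.empty

-- ===== PRECONDITION & SPEC =====
-- Pre_ restricts to the function's natural domain: a k-mer length is non-negative. For k < 0 A
-- still returns (negative slice bounds wrap), but those values are artefacts of Python slicing
-- and neither implementation's value is the specified one there.
def Pre_kmerset (seq : String) (k : Int) : Prop := 0 ≤ k
instance (seq : String) (k : Int) : Decidable (Pre_kmerset seq k) := by unfold Pre_kmerset; infer_instance
def pvWitness_kmerset : String × Int := ("ACGTNAGNNC", 3)

def Spec_kmerset (seq : String) (k : Int) (out : List String) : Prop := out = kmerset_alt seq k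
instance (seq : String) (k : Int) (out : List String) : Decidable (Spec_kmerset seq k out) := by unfold Spec_kmerset; infer_instance

-- ===== CLAIM (what is proved, stated in full; the proofs are below) =====
def Claim_equal_kmerset : Prop := ∀ (seq : String) (k : Int), Dom_kmerset seq k → Pre_kmerset seq k → Spec_kmerset seq k (kmerset seq k)

-- ===== LEMMAS AND PROOFS =====

-- maximal 'N'-free segments of a character list (proof-side mirror of seq.split('N'))
def pvSegs : List Char → List (List Char)
  | [] => [[]]
  | c :: t =>
      if c = 'N' then [] :: pvSegs t
      else
        match pvSegs t with
        | [] => [[c]]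
        | s :: ss => (c :: s) :: ss

-- all k-windows of a list, in position order
def pvWin (K : Nat) (s : List Char) : List (List Char) :=
  (List.range (s.length + 1 - K)).map (fun i => (s.drop i).take K)

-- the 'N'-free k-windows, in position order (what A keeps)
def pvFiltW (K : Nat) (cs : List Char) : List (List Char) :=
  (pvWin K cs).filter (fun w => !PySem.Chars.isIn ['N'] w)

theorem pv_head_eq_headI (l : List Char) (hd : l ≠ []) : l.head hd = l.headI := by
  cases l with
  | nil => simp at hd
  | cons a t => rfl

theorem pvSegs_ne_nil (l : List Char) : pvSegs l ≠ [] := by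
  induction l with
  | nil => simp [pvSegs]
  | cons c t ih =>
    simp only [pvSegs]
    split
    · simp
    · cases h : pvSegs t <;> simp

theorem pvSegs_head (l : List Char) : (pvSegs l).headI = l.takeWhile (· ≠ 'N') := by
  induction l with
  | nil => simp [pvSegs]
  | cons c t ih =>
    simp only [pvSegs]
    by_cases hc : c = 'N'
    · simp [hc, List.takeWhile]
    · cases h : pvSegs t with
      | nil => exact absurd h (pvSegs_ne_nil t)
      | cons s ss =>
        rw [h] at ih
        rw [if_neg hc]
        show ((c :: s) :: ss).headI = _
        simp only [List.headI] at ih ⊢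
        rw [List.takeWhile_cons, if_pos (by simpa using hc), ih]

-- splitOn's worker computes pvSegs
theorem pv_go_eq (fuel : Nat) (l cur : List Char) (ac : List (List Char)) (hf : l.length < fuel) :
    PySem.Chars.splitOn.go ['N'] fuel l cur ac =
      ac.reverse ++ ((cur.reverse ++ (pvSegs l).headI) :: (pvSegs l).tail) := by
  induction fuel generalizing l cur ac with
  | zero => omega
  | succ fuel ih =>
    cases l with
    | nil =>
      rw [PySem.Chars.splitOn.go]
      · simp [pvSegs]
      · omega
    | cons c rest =>
      rw [PySem.Chars.splitOn.go]
      by_cases hc : c = 'N'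
      · rw [if_pos (by simp [hc])]
        have hr : rest.length < fuel := by simpa using hf
        simp only [List.length_cons, List.length_nil, List.drop_succ_cons, List.drop_zero]
        rw [ih _ _ _ hr]
        have hnn := pvSegs_ne_nil rest
        cases hs : pvSegs rest with
        | nil => exact absurd hs hnn
        | cons s ss => simp [pvSegs, hc, hs, List.headI]
      · rw [if_neg (by simp [List.isPrefixOf]; exact fun h => hc h.symm)]
        have hr : rest.length < fuel := by simpa using hf
        rw [ih _ _ _ hr]
        cases hs : pvSegs rest with
        | nil => exact absurd hs (pvSegs_ne_nil rest)
        | cons s ss => simp [pvSegs, hc, hs, List.headI]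

theorem pvSplitOn_eq_segs (cs : List Char) : PySem.Chars.splitOn cs ['N'] = pvSegs cs := by
  unfold PySem.Chars.splitOn
  rw [pv_go_eq _ _ _ _ (by omega)]
  cases hs : pvSegs cs with
  | nil => exact absurd hs (pvSegs_ne_nil cs)
  | cons s ss => simp [List.headI]

theorem pv_mem_take_of_takeWhile_lt (l : List Char) (m : Nat)
    (h : (l.takeWhile (· ≠ 'N')).length < m) (h2 : (l.takeWhile (· ≠ 'N')).length < l.length) :
    'N' ∈ l.take m := by
  have hd : l.dropWhile (· ≠ 'N') ≠ [] := by
    intro he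
    have h3 := List.takeWhile_append_dropWhile (p := (· ≠ 'N')) (l := l)
    rw [he, List.append_nil] at h3
    rw [h3] at h2; omega
  have hh := List.head_dropWhile_not (p := (· ≠ 'N')) hd
  obtain ⟨c, dw, hcd⟩ := List.exists_cons_of_ne_nil hd
  have hc : c = 'N' := by
    rw [decide_eq_false_iff_not, not_not, pv_head_eq_headI _ hd, hcd] at hh
    simpa using hh
  rw [← List.takeWhile_append_dropWhile (p := (· ≠ 'N')) (l := l), List.take_append, hcd, hc]
  cases hm : m - (l.takeWhile (· ≠ 'N')).length with
  | zero => omega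
  | succ p => simp

theorem pvWin_cons (K : Nat) (c : Char) (t : List Char) (h : K ≤ t.length + 1) :
    pvWin K (c :: t) = ((c :: t).take K) :: pvWin K t := by
  unfold pvWin
  have h1 : (c :: t).length + 1 - K = (t.length + 1 - K) + 1 := by simp; omega
  rw [h1, List.range_succ_eq_map, List.map_cons, List.map_map]
  simp [Function.comp_def]

theorem pvWin_nil_of_short (K : Nat) (s : List Char) (h : s.length < K) : pvWin K s = [] := by
  unfold pvWin
  have : s.length + 1 - K = 0 := by omega
  simp [this]

-- the heart: A's kept windows are exactly the windows of the segments, in order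
theorem pv_core (K : Nat) (hK : 1 ≤ K) (cs : List Char) :
    pvFiltW K cs = (pvSegs cs).flatMap (pvWin K) := by
  induction cs with
  | nil =>
    simp [pvFiltW, pvWin, pvSegs, show 0 + 1 - K = 0 by omega]
  | cons c t ih =>
    by_cases hc : c = 'N'
    · subst hc
      have hseg : pvSegs ('N' :: t) = [] :: pvSegs t := by simp [pvSegs]
      rw [hseg, List.flatMap_cons, pvWin_nil_of_short K [] (by simpa using hK), List.nil_append, ← ih]
      by_cases hl : K ≤ t.length + 1
      · unfold pvFiltW
        rw [pvWin_cons K 'N' t hl, List.filter_cons]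
        have hin : PySem.Chars.isIn ['N'] (('N'::t).take K) = true := by
          rw [PySem.Chars.isIn_iff_infix, List.singleton_infix_iff]
          obtain ⟨K', rfl⟩ := Nat.exists_eq_add_of_le hK
          rw [Nat.add_comm, List.take_succ_cons]
          exact List.mem_cons_self
        simp [hin]
      · have e1 : pvWin K ('N'::t) = [] := pvWin_nil_of_short _ _ (by simp; omega)
        have e2 : pvWin K t = [] := pvWin_nil_of_short _ _ (by omega)
        simp [pvFiltW, e1, e2]
    · have hnn := pvSegs_ne_nil t
      cases hs : pvSegs t with
      | nil => exact absurd hs hnn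
      | cons s0 ss =>
        have hseg : pvSegs (c :: t) = (c :: s0) :: ss := by simp [pvSegs, hc, hs]
        have hhead : s0 = t.takeWhile (· ≠ 'N') := by
          have := pvSegs_head t; rw [hs] at this; simpa [List.headI] using this
        have hpre : s0 <+: t := hhead ▸ List.takeWhile_prefix _
        have hs0t : s0.length ≤ t.length := hpre.length_le
        rw [hs, List.flatMap_cons] at ih
        rw [hseg, List.flatMap_cons]
        by_cases h1 : K ≤ s0.length + 1
        · have hlt : K ≤ t.length + 1 := by omega
          have htake : (c :: t).take K = (c :: s0).take K := by
            obtain ⟨K', rfl⟩ := Nat.exists_eq_add_of_le hK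
            rw [Nat.add_comm, List.take_succ_cons, List.take_succ_cons]
            obtain ⟨r, hr⟩ := hpre
            rw [← hr, List.take_append_of_le_length (by omega)]
          have hfree : PySem.Chars.isIn ['N'] ((c::t).take K) = false := by
            rw [htake]
            rw [PySem.Chars.isIn_eq_false_iff, List.singleton_infix_iff]
            intro hmem
            have := List.mem_of_mem_take hmem
            rcases List.mem_cons.mp this with h' | h'
            · exact hc h'.symm
            · have := List.mem_takeWhile_imp (hhead ▸ h')
              simp at this
          unfold pvFiltW
          rw [pvWin_cons K c t hlt, List.filter_cons, hfree]
          rw [pvWin_cons K c s0 h1]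
          simp only [Bool.not_false, if_pos]
          rw [htake, show List.filter (fun w => !PySem.Chars.isIn ['N'] w) (pvWin K t) = pvFiltW K t from rfl, ih]
          simp
        · have hwin0 : pvWin K (c::s0) = [] := pvWin_nil_of_short K _ (by simp; omega)
          have hwins0 : pvWin K s0 = [] := pvWin_nil_of_short K _ (by omega)
          rw [hwin0, List.nil_append]
          rw [hwins0, List.nil_append] at ih
          rw [← ih]
          by_cases hlt : K ≤ t.length + 1
          · unfold pvFiltW
            rw [pvWin_cons K c t hlt, List.filter_cons]
            have hin : PySem.Chars.isIn ['N'] ((c::t).take K) = true := by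
              rw [PySem.Chars.isIn_iff_infix, List.singleton_infix_iff]
              obtain ⟨K', rfl⟩ := Nat.exists_eq_add_of_le hK
              rw [Nat.add_comm, List.take_succ_cons]
              apply List.mem_cons_of_mem
              apply pv_mem_take_of_takeWhile_lt t K' (by rw [← hhead]; omega) (by rw [← hhead]; omega)
            simp [hin]
          · have e1 : pvWin K (c::t) = [] := pvWin_nil_of_short _ _ (by simp; omega)
            have e2 : pvWin K t = [] := pvWin_nil_of_short _ _ (by omega)
            simp [pvFiltW, e1, e2]

-- loop-shape lemmas for the two folds
theorem pv_foldl_if {α : Type} (l : List α) (f : α → String) (S : PySem.Set String) :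
    l.foldl (fun S x => if PySem.Str.isIn "N" (f x) then S else PySem.Set.add S (f x)) S
      = ((l.map f).filter (fun x => !PySem.Str.isIn "N" x)).foldl PySem.Set.add S := by
  induction l generalizing S with
  | nil => rfl
  | cons a t ih =>
    simp only [List.foldl_cons, List.map_cons, List.filter_cons]
    by_cases h : PySem.Str.isIn "N" (f a) = true
    · rw [if_pos h, h]
      simp only [Bool.not_true, Bool.false_eq_true, if_false]
      exact ih S
    · rw [if_neg h]
      rw [Bool.not_eq_true] at h
      rw [h]
      simp only [Bool.not_false, if_true, List.foldl_cons]
      exact ih _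

theorem pv_foldl_join {α : Type} (ll : List α) (g : α → List String) (S : PySem.Set String) :
    ll.foldl (fun S a => (g a).foldl PySem.Set.add S) S
      = (ll.flatMap g).foldl PySem.Set.add S := by
  induction ll generalizing S with
  | nil => rfl
  | cons a t ih => simp [List.foldl_append, ih]

theorem pv_pyRange_eq (m K : Nat) :
    PySem.List.pyRange 0 ((m : Int) - (K : Int) + 1) 1
      = (List.range (m + 1 - K)).map (fun j => ((j : Nat) : Int)) := by
  by_cases h : K ≤ m
  · have he : (m : Int) - (K : Int) + 1 = ((m + 1 - K : Nat) : Int) := by omega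
    rw [he, PySem.List.pyRange_zero_natCast]
  · have h0 : m + 1 - K = 0 := by omega
    have hb : (m : Int) - (K : Int) + 1 ≤ 0 := by omega
    rw [h0]
    simp [PySem.List.pyRange]
    omega

theorem pv_slice_nat (s : String) (j K : Nat) :
    PySem.Str.slice s (some (j : Int)) (some ((j : Int) + (K : Int))) =
      String.ofList ((s.toList.drop j).take K) := by
  simp [PySem.Str.slice, PySem.List.slice_natCast_add]

-- A's program computes the fold of the filtered window list
theorem pv_A_eq (seq : String) (K : Nat) :
    kmerset seq (K : Int) = ((pvFiltW K seq.toList).map String.ofList).foldl PySem.Set.add [] := by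
  simp only [kmerset, PySem.Str.len]
  by_cases hnk : (seq.toList.length : Int) < (K : Int)
  · rw [if_pos hnk]
    have hw : pvWin K seq.toList = [] := pvWin_nil_of_short _ _ (by exact_mod_cast hnk)
    simp [pvFiltW, hw, PySem.Set.empty]
  · rw [if_neg hnk]
    rw [pv_pyRange_eq seq.toList.length K, List.foldl_map]
    simp only [pv_slice_nat]
    rw [pv_foldl_if (List.range (seq.toList.length + 1 - K))
        (fun j => String.ofList ((seq.toList.drop j).take K)) PySem.Set.empty]
    rw [show (List.range (seq.toList.length + 1 - K)).map
          (fun j => String.ofList ((seq.toList.drop j).take K))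
        = (pvWin K seq.toList).map String.ofList by
      unfold pvWin; rw [List.map_map]; rfl]
    rw [List.filter_map]
    have hp : ((fun x => !PySem.Str.isIn "N" x) ∘ String.ofList)
        = (fun w => !PySem.Chars.isIn ['N'] w) := by
      funext w
      simp [PySem.Str.isIn, show ("N" : String).toList = ['N'] by decide]
    rw [hp]
    rfl

-- B's program computes the fold of the concatenated segment windows
theorem pv_B_eq (seq : String) (K : Nat) :
    kmerset_alt seq (K : Int)
      = (((pvSegs seq.toList).flatMap (pvWin K)).map String.ofList).foldl PySem.Set.add [] := by
  unfold kmerset_alt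
  have htl : ("N" : String).toList = ['N'] := by decide
  have hsplit : (PySem.Str.split? seq "N").getD [] = (pvSegs seq.toList).map String.ofList := by
    simp [PySem.Str.split?, PySem.Chars.split?, htl, pvSplitOn_eq_segs]
  rw [hsplit, List.foldl_map]
  have hb : (fun (S : PySem.Set String) (s : List Char) =>
      (PySem.List.pyRange 0 (PySem.Str.len (String.ofList s) - (K : Int) + 1) 1).foldl
        (fun S i => PySem.Set.add S (PySem.Str.slice (String.ofList s) (some i) (some (i + (K : Int))))) S)
      = (fun S s => ((pvWin K s).map String.ofList).foldl PySem.Set.add S) := by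
    funext S s
    rw [show PySem.Str.len (String.ofList s) = (s.length : Int) by simp [PySem.Str.len]]
    rw [pv_pyRange_eq s.length K, List.foldl_map]
    simp only [pv_slice_nat]
    unfold pvWin
    rw [List.map_map, List.foldl_map]
    simp
  rw [hb, pv_foldl_join]
  rw [← List.map_flatMap]
  rfl

-- the degenerate k = 0 fold: a non-empty all-"" list folds to [""]
theorem pv_fold_all_empty (l : List String) (hne : l ≠ []) (hall : ∀ x ∈ l, x = "") :
    l.foldl PySem.Set.add [] = [""] := by
  have aux : ∀ (t : List String), (∀ x ∈ t, x = "") → t.foldl PySem.Set.add [""] = [""] := by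
    intro t
    induction t with
    | nil => intro _; rfl
    | cons a r ih =>
      intro h
      have ha : a = "" := h a List.mem_cons_self
      have he : PySem.Set.add [""] a = [""] := by rw [ha]; rfl
      simp only [List.foldl_cons, he]
      exact ih (fun x hx => h x (List.mem_cons_of_mem _ hx))
  cases l with
  | nil => exact absurd rfl hne
  | cons a t =>
    have ha : a = "" := hall a List.mem_cons_self
    have he : PySem.Set.add [] a = [""] := by rw [ha]; rfl
    simp only [List.foldl_cons, he]
    exact aux t (fun x hx => hall x (List.mem_cons_of_mem _ hx))

theorem pvWin_zero (s : List Char) : pvWin 0 s = List.replicate (s.length + 1) [] := by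
  unfold pvWin
  simp [List.map_const']

theorem pv_zero_filtW (cs : List Char) :
    ((pvFiltW 0 cs).map String.ofList).foldl PySem.Set.add [] = [""] := by
  have hf : pvFiltW 0 cs = List.replicate (cs.length + 1) [] := by
    unfold pvFiltW
    rw [pvWin_zero]
    rw [List.filter_replicate, if_pos (by decide)]
  apply pv_fold_all_empty
  · simp [hf]
  · intro x hx
    obtain ⟨w, hw, rfl⟩ := List.mem_map.mp hx
    rw [hf] at hw
    rw [List.eq_of_mem_replicate hw]

theorem pv_zero_flat (cs : List Char) :
    ((((pvSegs cs).flatMap (pvWin 0)).map String.ofList)).foldl PySem.Set.add [] = [""] := by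
  apply pv_fold_all_empty
  · cases hs : pvSegs cs with
    | nil => exact absurd hs (pvSegs_ne_nil cs)
    | cons s0 ss =>
      simp only [List.flatMap_cons, pvWin_zero]
      simp [List.replicate_succ]
  · intro x hx
    obtain ⟨w, hw, rfl⟩ := List.mem_map.mp hx
    obtain ⟨s, _, hws⟩ := List.mem_flatMap.mp hw
    rw [pvWin_zero] at hws
    rw [List.eq_of_mem_replicate hws]

-- ===== VERDICT (by name: the statement is the Claim_ definition above) =====
theorem kmerset_spec : Claim_equal_kmerset := by
  intro seq k _ hpre
  unfold Spec_kmerset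
  unfold Pre_kmerset at hpre
  lift k to Nat using hpre with K
  rw [pv_A_eq, pv_B_eq]
  cases K with
  | zero => rw [pv_zero_filtW, pv_zero_flat]
  | succ K' => rw [pv_core (K' + 1) (by omega)]
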